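-- pv_equiv track=rewrite | github.com/js1998/python-snake | app/food.py | optimal_move
-- ===== SOURCE A (Python) =====
-- def optimal_move(direction, bodyPositions, height, width):
--     headPos = bodyPositions[0]
--
--     i = 1
--     while i < len(bodyPositions):
--
--         headPos_x = headPos["x"]
--         headPos_y = headPos["y"]
--
--         bodyPos_x = bodyPositions[i]["x"]
--         bodyPos_y = bodyPositions[i]["y"]
--
--         dist_y = bodyPos_y - headPos_y
--         dist_x = bodyPos_x - headPos_x
--
--         if direction == "up":
--             if (abs(dist_y) <= 2 and bodyPos_y < headPos_y and headPos_x == bodyPos_x) or headPos_y == 0: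
--                 return False
--         if direction == "down":
--             if (abs(dist_y) <= 2 and bodyPos_y > headPos_y and headPos_x == bodyPos_x) or headPos_y == height - 1:
--                 return False
--         if direction == "right":
--             if (abs(dist_x) <= 2 and bodyPos_x > headPos_x and headPos_y == bodyPos_y) or headPos_x == width - 1:
--                 return False
--         if direction == "left":
--             if (abs(dist_x) <= 2 and bodyPos_x < headPos_x and headPos_y == bodyPos_y) or headPos_x == 0:
--                 return False
--
--         i = i + 1
--
--     return True
-- ===== SOURCE B (Python) =====
-- def optimal_move(direction, bodyPositions, height, width):
--     head = bodyPositions[0]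
--     body = bodyPositions[1:]
--     if not body:
--         return True
--     hx, hy = head["x"], head["y"]
--     at_wall = {
--         "up": hy == 0,
--         "down": hy == height - 1,
--         "right": hx == width - 1,
--         "left": hx == 0,
--     }.get(direction, False)
--     if at_wall:
--         return False
--     occupied = {(b["x"], b["y"]) for b in body}
--     ahead = {
--         "up": [(hx, hy - 1), (hx, hy - 2)],
--         "down": [(hx, hy + 1), (hx, hy + 2)],
--         "right": [(hx + 1, hy), (hx + 2, hy)],
--         "left": [(hx - 1, hy), (hx - 2, hy)],
--     }.get(direction, [])
--     return all(c not in occupied for c in ahead)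
-- ===== Notes on version B (the rewrite author's own statement) =====
-- stated objective: idiomatic
-- what changed: Replaces the index-driven while loop that re-tests all four direction conditions per segment with an up-front wall check for the given direction plus a set of occupied (x,y) cells probed at the two cells directly ahead.
-- outside the precondition, e.g. on optimal_move('up', [{'x': 2, 'y': 2}, {'x': 2, 'y': 1}, {'y': 9}], 5, 5): A returns False, B raises KeyError
import Mathlib
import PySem

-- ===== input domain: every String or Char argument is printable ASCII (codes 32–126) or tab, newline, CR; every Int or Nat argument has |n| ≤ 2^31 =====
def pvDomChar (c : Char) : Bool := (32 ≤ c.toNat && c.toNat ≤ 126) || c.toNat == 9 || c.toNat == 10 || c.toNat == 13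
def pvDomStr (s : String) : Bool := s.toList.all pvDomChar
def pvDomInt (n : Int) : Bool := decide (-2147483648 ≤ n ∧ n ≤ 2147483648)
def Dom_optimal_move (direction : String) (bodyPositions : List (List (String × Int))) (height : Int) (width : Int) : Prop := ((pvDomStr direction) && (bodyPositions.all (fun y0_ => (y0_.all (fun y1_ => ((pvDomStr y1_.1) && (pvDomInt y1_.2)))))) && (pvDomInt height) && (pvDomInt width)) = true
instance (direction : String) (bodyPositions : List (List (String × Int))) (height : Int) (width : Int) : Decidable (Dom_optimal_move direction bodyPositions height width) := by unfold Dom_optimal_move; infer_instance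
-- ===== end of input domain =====

-- B replaces A's per-segment four-way condition scan by one wall test for the given
-- direction plus a set of occupied cells probed at the two cells ahead (idiomatic rewrite).

-- d[k] (first-match association-list lookup); none = Python KeyError, excluded by Pre_.
def pyKey (d : List (String × Int)) (k : String) : Int := (d.lookup k).getD 0

-- ===== PORT A =====
-- the while loop of A over bodyPositions[1:], head fixed
def aLoop (direction : String) (headPos : List (String × Int)) (rest : List (List (String × Int))) (height : Int) (width : Int) : Bool :=
  match rest with
  | [] => true
  | b :: bs =>
    let headPos_x := pyKey headPos "x"
    let headPos_y := pyKey headPos "y"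
    let bodyPos_x := pyKey b "x"
    let bodyPos_y := pyKey b "y"
    let dist_y := bodyPos_y - headPos_y
    let dist_x := bodyPos_x - headPos_x
    if direction = "up" ∧ ((|dist_y| ≤ 2 ∧ bodyPos_y < headPos_y ∧ headPos_x = bodyPos_x) ∨ headPos_y = 0) then false
    else if direction = "down" ∧ ((|dist_y| ≤ 2 ∧ bodyPos_y > headPos_y ∧ headPos_x = bodyPos_x) ∨ headPos_y = height - 1) then false
    else if direction = "right" ∧ ((|dist_x| ≤ 2 ∧ bodyPos_x > headPos_x ∧ headPos_y = bodyPos_y) ∨ headPos_x = width - 1) then false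
    else if direction = "left" ∧ ((|dist_x| ≤ 2 ∧ bodyPos_x < headPos_x ∧ headPos_y = bodyPos_y) ∨ headPos_x = 0) then false
    else aLoop direction headPos bs height width

def optimal_move (direction : String) (bodyPositions : List (List (String × Int))) (height : Int) (width : Int) : Bool :=
  let headPos := bodyPositions.headD []   -- bodyPositions[0]; the empty list (IndexError) is excluded by Pre_
  aLoop direction headPos bodyPositions.tail height width

-- ===== PORT B =====
-- Source B's dict-literal .get(direction, False) wall flag, as a lookup chain
def atWallB (direction : String) (hx hy height width : Int) : Bool :=
  if direction = "up" then hy == 0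
  else if direction = "down" then hy == height - 1
  else if direction = "right" then hx == width - 1
  else if direction = "left" then hx == 0
  else false

-- Source B's dict-literal .get(direction, []) of the two cells ahead
def aheadB (direction : String) (hx hy : Int) : List (Int × Int) :=
  if direction = "up" then [(hx, hy - 1), (hx, hy - 2)]
  else if direction = "down" then [(hx, hy + 1), (hx, hy + 2)]
  else if direction = "right" then [(hx + 1, hy), (hx + 2, hy)]
  else if direction = "left" then [(hx - 1, hy), (hx - 2, hy)]
  else []

def optimal_move_alt (direction : String) (bodyPositions : List (List (String × Int))) (height : Int) (width : Int) : Bool :=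
  let head := bodyPositions.headD []      -- bodyPositions[0]; the empty list (IndexError) is excluded by Pre_
  let body := bodyPositions.tail
  if body.isEmpty then true
  else
    let hx := pyKey head "x"
    let hy := pyKey head "y"
    if atWallB direction hx hy height width then false
    else
      let occupied : PySem.Set (Int × Int) := PySem.Set.ofList (body.map (fun b => (pyKey b "x", pyKey b "y")))
      (aheadB direction hx hy).all (fun c => !(PySem.Set.contains occupied c))

-- ===== PRECONDITION & SPEC =====
-- Pre_ excludes inputs where the Pythons raise (empty list = IndexError; with at least two
-- segments, a dict without key "x" or "y" = KeyError — a single-segment snake never reads keys).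
-- Requiring EVERY segment to carry both keys is slightly narrower
-- than A's domain: A can return False before reaching a malformed later segment, while B
-- (building its set of all body cells) raises KeyError there — see the cite in claim.json.
def Pre_optimal_move (direction : String) (bodyPositions : List (List (String × Int))) (height : Int) (width : Int) : Prop :=
  bodyPositions ≠ [] ∧
    (bodyPositions.tail ≠ [] → ∀ d ∈ bodyPositions, (d.lookup "x").isSome ∧ (d.lookup "y").isSome)

instance (direction : String) (bodyPositions : List (List (String × Int))) (height : Int) (width : Int) : Decidable (Pre_optimal_move direction bodyPositions height width) := by unfold Pre_optimal_move; infer_instance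

def pvWitness_optimal_move : String × (List (List (String × Int))) × Int × Int :=
  ("up", [[("x", 2), ("y", 2)], [("x", 2), ("y", 3)]], 5, 5)

def Spec_optimal_move (direction : String) (bodyPositions : List (List (String × Int))) (height : Int) (width : Int) (out : Bool) : Prop := out = optimal_move_alt direction bodyPositions height width
instance (direction : String) (bodyPositions : List (List (String × Int))) (height : Int) (width : Int) (out : Bool) : Decidable (Spec_optimal_move direction bodyPositions height width out) := by unfold Spec_optimal_move; infer_instance

-- ===== CLAIM (what is proved, stated in full; the proofs are below) =====
def Claim_equal_optimal_move : Prop := ∀ (direction : String) (bodyPositions : List (List (String × Int))) (height : Int) (width : Int), Dom_optimal_move direction bodyPositions height width → Pre_optimal_move direction bodyPositions height width → Spec_optimal_move direction bodyPositions height width (optimal_move direction bodyPositions height width)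

-- ===== LEMMAS AND PROOFS =====

-- the per-element condition on which A's loop returns False
def condA (direction : String) (headPos b : List (String × Int)) (height width : Int) : Bool :=
  let hx := pyKey headPos "x"
  let hy := pyKey headPos "y"
  let bx := pyKey b "x"
  let by' := pyKey b "y"
  decide ((direction = "up" ∧ ((|by' - hy| ≤ 2 ∧ by' < hy ∧ hx = bx) ∨ hy = 0)) ∨
          (direction = "down" ∧ ((|by' - hy| ≤ 2 ∧ by' > hy ∧ hx = bx) ∨ hy = height - 1)) ∨
          (direction = "right" ∧ ((|bx - hx| ≤ 2 ∧ bx > hx ∧ hy = by') ∨ hx = width - 1)) ∨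
          (direction = "left" ∧ ((|bx - hx| ≤ 2 ∧ bx < hx ∧ hy = by') ∨ hx = 0)))

-- A's loop returns True iff no segment of the tail triggers its condition
lemma aLoop_eq_all (direction : String) (headPos : List (String × Int)) (rest : List (List (String × Int))) (height width : Int) :
    aLoop direction headPos rest height width = rest.all (fun b => !condA direction headPos b height width) := by
  induction rest with
  | nil => rfl
  | cons b bs ih =>
    rw [aLoop]
    split_ifs with h1 h2 h3 h4
    · have hc : condA direction headPos b height width = true := by
        simp only [condA, decide_eq_true_eq]; exact Or.inl h1
      rw [List.all_cons, hc]; rfl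
    · have hc : condA direction headPos b height width = true := by
        simp only [condA, decide_eq_true_eq]; exact Or.inr (Or.inl h2)
      rw [List.all_cons, hc]; rfl
    · have hc : condA direction headPos b height width = true := by
        simp only [condA, decide_eq_true_eq]; exact Or.inr (Or.inr (Or.inl h3))
      rw [List.all_cons, hc]; rfl
    · have hc : condA direction headPos b height width = true := by
        simp only [condA, decide_eq_true_eq]; exact Or.inr (Or.inr (Or.inr h4))
      rw [List.all_cons, hc]; rfl
    · have hc : condA direction headPos b height width = false := by
        simp only [condA, decide_eq_false_iff_not]
        rintro (h | h | h | h) <;> [exact h1 h; exact h2 h; exact h3 h; exact h4 h]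
      rw [List.all_cons, hc, ih]; rfl

-- A's per-element condition = (head at the wall) or (this segment occupies a cell ahead)
lemma condA_split (direction : String) (headPos b : List (String × Int)) (height width : Int) :
    condA direction headPos b height width
      = (atWallB direction (pyKey headPos "x") (pyKey headPos "y") height width
         || decide ((pyKey b "x", pyKey b "y") ∈ aheadB direction (pyKey headPos "x") (pyKey headPos "y"))) := by
  rw [Bool.eq_iff_iff]
  by_cases hu : direction = "up"
  · subst hu
    simp [condA, atWallB, aheadB, Prod.ext_iff, abs_le]
    omega
  · by_cases hd : direction = "down"
    · subst hd
      simp [condA, atWallB, aheadB, Prod.ext_iff, abs_le]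
      omega
    · by_cases hr : direction = "right"
      · subst hr
        simp [condA, atWallB, aheadB, Prod.ext_iff, abs_le]
        omega
      · by_cases hl : direction = "left"
        · subst hl
          simp [condA, atWallB, aheadB, Prod.ext_iff, abs_le]
          omega
        · simp [condA, atWallB, aheadB, hu, hd, hr, hl]

-- 'no element of l maps into A' = 'no cell of A is an occupied cell of l'
lemma all_not_mem_comm {α β : Type} [BEq α] [LawfulBEq α] (l : List β) (f : β → α) (A : List α) :
    l.all (fun e => !decide (f e ∈ A)) = A.all (fun c => !(PySem.Set.contains (PySem.Set.ofList (l.map f)) c)) := by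
  rw [Bool.eq_iff_iff]
  simp [List.all_eq_true, PySem.Set.mem_ofList]
  aesop

-- ===== VERDICT (by name: the statement is the Claim_ definition above) =====
theorem optimal_move_spec : Claim_equal_optimal_move := by
  intro direction bodyPositions height width _hdom _hpre
  unfold Spec_optimal_move optimal_move optimal_move_alt
  rw [aLoop_eq_all]
  cases bodyPositions with
  | nil => rfl
  | cons head body =>
    simp only [List.headD_cons, List.tail_cons]
    cases body with
    | nil => rfl
    | cons b bs =>
      simp only [List.isEmpty_cons, Bool.false_eq_true, if_false]
      simp only [condA_split]
      by_cases hw : atWallB direction (pyKey head "x") (pyKey head "y") height width = true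
      · simp [hw]
      · rw [Bool.not_eq_true] at hw
        simp only [hw, Bool.false_or, if_neg Bool.false_ne_true]
        exact all_not_mem_comm (b :: bs) (fun e => (pyKey e "x", pyKey e "y")) _
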